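-- pv_equiv track=rewrite | github.com/pypi-data/pypi-mirror-370 | packages/hidroaccess/hidroaccess-1.1.1.tar.gz/hidroaccess-1.1.1/hidroaccess/access.py | _defineIntervaloBuscaLongo
-- ===== SOURCE A (Python) =====
-- def _defineIntervaloBuscaLongo(qtdDiasDownload: int)->str:
--     """Define o melhor parâmetro para o campo "Range Intervalo de Busca" para longos períodos
--
--     Args:
--         qtdDiasDownload (int): Quantidade total de dias desejados
--
--     Returns:
--         str: Parâmetro para requisição
--     """
--     intervalos = [
--         (30, "DIAS_30"),
--         (21, "DIAS_21"),
--         (14, "DIAS_14"),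
--         (7, "DIAS_7"),
--         (2, "DIAS_2"),
--         (0, "HORA_24")
--     ]
--     for dias, intervalo in intervalos:
--         if qtdDiasDownload >= dias:
--             return intervalo
-- ===== SOURCE B (Python) =====
-- import bisect
--
-- _THRESHOLDS = [0, 2, 7, 14, 21, 30]
-- _LABELS = ["HORA_24", "DIAS_2", "DIAS_7", "DIAS_14", "DIAS_21", "DIAS_30"]
--
-- def _defineIntervaloBuscaLongo(qtdDiasDownload: int) -> str:
--     idx = bisect.bisect_right(_THRESHOLDS, qtdDiasDownload) - 1
--     if idx < 0:
--         return None
--     return _LABELS[idx]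
-- ===== Notes on version B (the rewrite author's own statement) =====
-- stated objective: alternative
-- what changed: Replaces the descending linear scan over (threshold,label) pairs with a bisect_right lookup into an ascending threshold table with a parallel label list.
-- outside the precondition, e.g. on _defineIntervaloBuscaLongo(-1): A returns None, B returns None
import Mathlib
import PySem

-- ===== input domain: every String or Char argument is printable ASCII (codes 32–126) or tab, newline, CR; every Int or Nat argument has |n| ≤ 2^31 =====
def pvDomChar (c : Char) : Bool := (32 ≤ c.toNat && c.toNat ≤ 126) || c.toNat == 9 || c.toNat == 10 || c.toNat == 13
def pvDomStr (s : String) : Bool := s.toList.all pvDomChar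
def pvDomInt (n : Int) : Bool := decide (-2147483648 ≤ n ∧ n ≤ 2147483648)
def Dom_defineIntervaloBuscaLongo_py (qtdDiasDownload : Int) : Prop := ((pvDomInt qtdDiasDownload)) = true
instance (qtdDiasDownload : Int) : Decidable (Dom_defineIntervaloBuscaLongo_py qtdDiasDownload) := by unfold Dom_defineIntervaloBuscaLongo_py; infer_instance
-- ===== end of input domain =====

-- B replaces A's descending linear scan with a bisect_right lookup into an ascending
-- threshold table with a parallel label list (alternative decomposition, same cost).
-- Pre_ excludes negative inputs, on which A falls through and returns None (not a str).


-- ===== PORT A =====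
-- A's for-loop over the descending (threshold, label) pairs with early return.
-- The empty-list case is Python's implicit 'return None' fall-through; unreachable on Pre_.
def defineIntervaloBuscaLongo_loopA : List (Int × String) → Int → String
  | [], _ => ""
  | (dias, intervalo) :: rest, n => if n ≥ dias then intervalo else defineIntervaloBuscaLongo_loopA rest n

def defineIntervaloBuscaLongo_py (qtdDiasDownload : Int) : String :=
  let intervalos : List (Int × String) :=
    [(30, "DIAS_30"), (21, "DIAS_21"), (14, "DIAS_14"), (7, "DIAS_7"), (2, "DIAS_2"), (0, "HORA_24")]
  defineIntervaloBuscaLongo_loopA intervalos qtdDiasDownload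

-- ===== PORT B =====
-- bisect.bisect_right on a sorted list = number of elements ≤ x (ported as countP).
def defineIntervaloBuscaLongo_py_alt (qtdDiasDownload : Int) : String :=
  let thresholds : List Int := [0, 2, 7, 14, 21, 30]
  let labels : List String := ["HORA_24", "DIAS_2", "DIAS_7", "DIAS_14", "DIAS_21", "DIAS_30"]
  let idx : Int := (thresholds.countP (fun t => t ≤ qtdDiasDownload) : Int) - 1
  if idx < 0 then ""  -- Python B returns None here; unreachable on Pre_
  else (PySem.List.pyGet? labels idx).getD ""

-- ===== PRECONDITION & SPEC =====
-- Pre_ excludes qtdDiasDownload < 0: there A falls through its loop and returns None,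
-- which is not a value of the declared return type str.
def Pre_defineIntervaloBuscaLongo_py (qtdDiasDownload : Int) : Prop := 0 ≤ qtdDiasDownload
instance (qtdDiasDownload : Int) : Decidable (Pre_defineIntervaloBuscaLongo_py qtdDiasDownload) := by unfold Pre_defineIntervaloBuscaLongo_py; infer_instance
def pvWitness_defineIntervaloBuscaLongo_py : Int := 9

def Spec_defineIntervaloBuscaLongo_py (qtdDiasDownload : Int) (out : String) : Prop := out = defineIntervaloBuscaLongo_py_alt qtdDiasDownload
instance (qtdDiasDownload : Int) (out : String) : Decidable (Spec_defineIntervaloBuscaLongo_py qtdDiasDownload out) := by unfold Spec_defineIntervaloBuscaLongo_py; infer_instance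

-- ===== CLAIM =====
def Claim_equal_defineIntervaloBuscaLongo_py : Prop := ∀ (qtdDiasDownload : Int), Dom_defineIntervaloBuscaLongo_py qtdDiasDownload → Pre_defineIntervaloBuscaLongo_py qtdDiasDownload → Spec_defineIntervaloBuscaLongo_py qtdDiasDownload (defineIntervaloBuscaLongo_py qtdDiasDownload)

-- ===== LEMMAS AND PROOFS =====

-- ===== VERDICT =====
theorem defineIntervaloBuscaLongo_py_spec : Claim_equal_defineIntervaloBuscaLongo_py := by
  intro n _hdom hpre
  unfold Pre_defineIntervaloBuscaLongo_py at hpre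
  unfold Spec_defineIntervaloBuscaLongo_py defineIntervaloBuscaLongo_py defineIntervaloBuscaLongo_py_alt
  by_cases h30 : 30 ≤ n <;> by_cases h21 : 21 ≤ n <;> by_cases h14 : 14 ≤ n <;>
    by_cases h7 : 7 ≤ n <;> by_cases h2 : 2 ≤ n <;>
    first
      | omega
      | (simp only [defineIntervaloBuscaLongo_loopA, List.countP, List.countP.go,
          ge_iff_le, h30, h21, h14, h7, h2, hpre,
          decide_true, decide_false, if_true, if_false]
         decide)
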